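-- pv_equiv track=rewrite | github.com/Rws117r/AsciiRpg2 | data/player.py | get_character_title
-- ===== SOURCE A (Python) =====
-- def get_character_title(character_class: str, alignment: str, level: int) -> str:
--     """Get appropriate title for character class/alignment/level."""
--     titles = {
--         "Fighter": {
--             "Lawful": {(1, 3): "Guardian", (4, 6): "Defender", (7, 10): "Champion"},
--             "Chaotic": {(1, 3): "Warrior", (4, 6): "Berserker", (7, 10): "Warlord"},
--             "Neutral": {(1, 3): "Soldier", (4, 6): "Veteran", (7, 10): "Commander"}
--         },
--         "Priest": {
--             "Lawful": {(1, 3): "Acolyte", (4, 6): "Cleric", (7, 10): "High Priest"},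
--             "Chaotic": {(1, 3): "Zealot", (4, 6): "Fanatic", (7, 10): "Prophet"},
--             "Neutral": {(1, 3): "Initiate", (4, 6): "Priest", (7, 10): "Elder"}
--         },
--         "Wizard": {
--             "Lawful": {(1, 3): "Apprentice", (4, 6): "Mage", (7, 10): "Arch-Mage"},
--             "Chaotic": {(1, 3): "Hedge Wizard", (4, 6): "Sorcerer", (7, 10): "Archmage"},
--             "Neutral": {(1, 3): "Student", (4, 6): "Scholar", (7, 10): "Sage"}
--         },
--         "Thief": {
--             "Lawful": {(1, 3): "Scout", (4, 6): "Agent", (7, 10): "Spymaster"},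
--             "Chaotic": {(1, 3): "Rogue", (4, 6): "Thief", (7, 10): "Master Thief"},
--             "Neutral": {(1, 3): "Burglar", (4, 6): "Infiltrator", (7, 10): "Shadow"}
--         }
--     }
--
--     class_titles = titles.get(character_class, {})
--     alignment_titles = class_titles.get(alignment, {})
--
--     for level_range, title in alignment_titles.items():
--         if level_range[0] <= level <= level_range[1]:
--             return title
--
--     return "Adventurer"
-- ===== SOURCE B (Python) =====
-- # B: no dicts at all -- two small tuples give class/alignment ordinals via .index,
-- # a tier is computed from the level, and the title is read from one flat 36-entry
-- # tuple at the arithmetically computed position (class*3+alignment)*3+tier.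
-- _CLASSES = ("Fighter", "Priest", "Wizard", "Thief")
-- _ALIGNMENTS = ("Lawful", "Chaotic", "Neutral")
-- _FLAT = (
--     "Guardian", "Defender", "Champion",
--     "Warrior", "Berserker", "Warlord",
--     "Soldier", "Veteran", "Commander",
--     "Acolyte", "Cleric", "High Priest",
--     "Zealot", "Fanatic", "Prophet",
--     "Initiate", "Priest", "Elder",
--     "Apprentice", "Mage", "Arch-Mage",
--     "Hedge Wizard", "Sorcerer", "Archmage",
--     "Student", "Scholar", "Sage",
--     "Scout", "Agent", "Spymaster",
--     "Rogue", "Thief", "Master Thief",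
--     "Burglar", "Infiltrator", "Shadow",
-- )
--
--
-- def get_character_title(character_class: str, alignment: str, level: int) -> str:
--     """Get appropriate title for character class/alignment/level."""
--     if character_class not in _CLASSES or alignment not in _ALIGNMENTS:
--         return "Adventurer"
--     if 1 <= level <= 3:
--         tier = 0
--     elif 4 <= level <= 6:
--         tier = 1
--     elif 7 <= level <= 10:
--         tier = 2
--     else:
--         return "Adventurer"
--     idx = (_CLASSES.index(character_class) * 3 + _ALIGNMENTS.index(alignment)) * 3 + tier
--     return _FLAT[idx]
-- ===== Notes on version B (the rewrite author's own statement) =====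
-- stated objective: alternative
-- what changed: Replaced the nested class->alignment->range-tuple dicts and the range-scan loop with a flat 36-entry title array indexed arithmetically by (class ordinal*3 + alignment ordinal)*3 + level tier, the ordinals coming from .index on two small tuples and the tier from direct level comparisons.
import Mathlib
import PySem

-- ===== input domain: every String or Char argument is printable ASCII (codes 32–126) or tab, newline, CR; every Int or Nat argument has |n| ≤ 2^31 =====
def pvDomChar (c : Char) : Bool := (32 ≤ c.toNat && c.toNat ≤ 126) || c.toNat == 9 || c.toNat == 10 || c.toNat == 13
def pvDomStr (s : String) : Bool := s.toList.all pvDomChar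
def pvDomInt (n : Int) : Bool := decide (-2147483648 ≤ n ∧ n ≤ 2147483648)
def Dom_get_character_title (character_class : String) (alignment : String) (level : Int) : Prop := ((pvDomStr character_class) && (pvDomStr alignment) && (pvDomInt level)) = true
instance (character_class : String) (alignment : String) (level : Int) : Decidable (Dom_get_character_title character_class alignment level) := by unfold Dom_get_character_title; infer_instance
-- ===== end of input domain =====

-- B drops A's nested dicts and range-scan loop: a flat 36-entry title array is indexed
-- arithmetically by (class ordinal*3 + alignment ordinal)*3 + level tier (alternative
-- decomposition; same behaviour, proved equal on the whole domain).

-- ===== PORT A =====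
def titlesA : PySem.Dict String (PySem.Dict String (PySem.Dict (Int × Int) String)) :=
  PySem.Dict.mk
  [("Fighter",
      PySem.Dict.mk [("Lawful",  PySem.Dict.mk [((1, 3), "Guardian"), ((4, 6), "Defender"), ((7, 10), "Champion")]),
       ("Chaotic", PySem.Dict.mk [((1, 3), "Warrior"), ((4, 6), "Berserker"), ((7, 10), "Warlord")]),
       ("Neutral", PySem.Dict.mk [((1, 3), "Soldier"), ((4, 6), "Veteran"), ((7, 10), "Commander")])]),
   ("Priest",
      PySem.Dict.mk [("Lawful",  PySem.Dict.mk [((1, 3), "Acolyte"), ((4, 6), "Cleric"), ((7, 10), "High Priest")]),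
       ("Chaotic", PySem.Dict.mk [((1, 3), "Zealot"), ((4, 6), "Fanatic"), ((7, 10), "Prophet")]),
       ("Neutral", PySem.Dict.mk [((1, 3), "Initiate"), ((4, 6), "Priest"), ((7, 10), "Elder")])]),
   ("Wizard",
      PySem.Dict.mk [("Lawful",  PySem.Dict.mk [((1, 3), "Apprentice"), ((4, 6), "Mage"), ((7, 10), "Arch-Mage")]),
       ("Chaotic", PySem.Dict.mk [((1, 3), "Hedge Wizard"), ((4, 6), "Sorcerer"), ((7, 10), "Archmage")]),
       ("Neutral", PySem.Dict.mk [((1, 3), "Student"), ((4, 6), "Scholar"), ((7, 10), "Sage")])]),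
   ("Thief",
      PySem.Dict.mk [("Lawful",  PySem.Dict.mk [((1, 3), "Scout"), ((4, 6), "Agent"), ((7, 10), "Spymaster")]),
       ("Chaotic", PySem.Dict.mk [((1, 3), "Rogue"), ((4, 6), "Thief"), ((7, 10), "Master Thief")]),
       ("Neutral", PySem.Dict.mk [((1, 3), "Burglar"), ((4, 6), "Infiltrator"), ((7, 10), "Shadow")])])]

-- the for-loop over alignment_titles.items(): first range containing level wins, else "Adventurer"
def titleLoopA (items : List ((Int × Int) × String)) (level : Int) : String :=
  match items with
  | [] => "Adventurer"
  | (level_range, title) :: rest =>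
      if level_range.1 ≤ level ∧ level ≤ level_range.2 then title
      else titleLoopA rest level

def get_character_title (character_class : String) (alignment : String) (level : Int) : String :=
  let class_titles := PySem.Dict.getD titlesA character_class PySem.Dict.empty
  let alignment_titles := PySem.Dict.getD class_titles alignment PySem.Dict.empty
  titleLoopA alignment_titles.items level

-- ===== PORT B =====
-- B: ordinals from .index on two tuples, tier from level comparisons, flat array lookup
def classesB : List String := ["Fighter", "Priest", "Wizard", "Thief"]
def alignmentsB : List String := ["Lawful", "Chaotic", "Neutral"]
def flatB : List String :=
  ["Guardian", "Defender", "Champion",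
   "Warrior", "Berserker", "Warlord",
   "Soldier", "Veteran", "Commander",
   "Acolyte", "Cleric", "High Priest",
   "Zealot", "Fanatic", "Prophet",
   "Initiate", "Priest", "Elder",
   "Apprentice", "Mage", "Arch-Mage",
   "Hedge Wizard", "Sorcerer", "Archmage",
   "Student", "Scholar", "Sage",
   "Scout", "Agent", "Spymaster",
   "Rogue", "Thief", "Master Thief",
   "Burglar", "Infiltrator", "Shadow"]

def get_character_title_alt (character_class : String) (alignment : String) (level : Int) : String :=
  if ¬ (classesB.contains character_class ∧ alignmentsB.contains alignment) then "Adventurer"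
  else
    let tier? : Option Int :=
      if 1 ≤ level ∧ level ≤ 3 then some 0
      else if 4 ≤ level ∧ level ≤ 6 then some 1
      else if 7 ≤ level ∧ level ≤ 10 then some 2
      else none
    match tier? with
    | none => "Adventurer"
    | some tier =>
        -- .index cannot fail here (membership guarded above); getD 0 only makes it total
        let ci : Int := ((PySem.List.index? classesB character_class).getD 0 : Nat)
        let ai : Int := ((PySem.List.index? alignmentsB alignment).getD 0 : Nat)
        -- _FLAT[idx]: idx is always in range; getD only makes the lookup total
        (PySem.List.pyGet? flatB ((ci * 3 + ai) * 3 + tier)).getD "Adventurer"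

-- ===== PRECONDITION & SPEC =====
def Spec_get_character_title (character_class : String) (alignment : String) (level : Int) (out : String) : Prop := out = get_character_title_alt character_class alignment level
instance (character_class : String) (alignment : String) (level : Int) (out : String) : Decidable (Spec_get_character_title character_class alignment level out) := by unfold Spec_get_character_title; infer_instance

-- ===== CLAIM =====
def Claim_equal_get_character_title : Prop := ∀ (character_class : String) (alignment : String) (level : Int), Dom_get_character_title character_class alignment level → Spec_get_character_title character_class alignment level (get_character_title character_class alignment level)

-- ===== LEMMAS AND PROOFS =====

theorem gct_no_class (c a : String) (l : Int) (h1 : "Fighter" ≠ c) (h2 : "Priest" ≠ c)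
    (h3 : "Wizard" ≠ c) (h4 : "Thief" ≠ c) : get_character_title c a l = "Adventurer" := by
  simp [get_character_title, titlesA, PySem.Dict.getD, PySem.Dict.get?, titleLoopA, PySem.Dict.empty, h1, h2, h3, h4]

theorem gct_alt_no_class (c a : String) (l : Int) (h1 : "Fighter" ≠ c) (h2 : "Priest" ≠ c)
    (h3 : "Wizard" ≠ c) (h4 : "Thief" ≠ c) : get_character_title_alt c a l = "Adventurer" := by
  have hc : c ∉ classesB := by
    intro h
    simp only [classesB, List.mem_cons, List.not_mem_nil, or_false] at h
    rcases h with h | h | h | h <;> simp_all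
  simp [get_character_title_alt, hc]

theorem gct_no_align (c : String) (hc : c = "Fighter" ∨ c = "Priest" ∨ c = "Wizard" ∨ c = "Thief")
    (a : String) (l : Int) (h1 : "Lawful" ≠ a) (h2 : "Chaotic" ≠ a)
    (h3 : "Neutral" ≠ a) : get_character_title c a l = "Adventurer" := by
  rcases hc with h | h | h | h <;> subst h <;>
    simp [get_character_title, titlesA, PySem.Dict.getD, PySem.Dict.get?, titleLoopA, PySem.Dict.empty, h1, h2, h3]

theorem gct_alt_no_align (c a : String) (l : Int) (h1 : "Lawful" ≠ a) (h2 : "Chaotic" ≠ a)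
    (h3 : "Neutral" ≠ a) : get_character_title_alt c a l = "Adventurer" := by
  have ha : a ∉ alignmentsB := by
    intro h
    simp only [alignmentsB, List.mem_cons, List.not_mem_nil, or_false] at h
    rcases h with h | h | h <;> simp_all
  simp [get_character_title_alt, ha]


theorem tiers_eq (t1 t2 t3 : String) (l : Int) :
    titleLoopA [((1, 3), t1), ((4, 6), t2), ((7, 10), t3)] l =
      (if 1 ≤ l ∧ l ≤ 3 then t1 else if 4 ≤ l ∧ l ≤ 6 then t2
       else if 7 ≤ l ∧ l ≤ 10 then t3 else "Adventurer") := by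
  simp [titleLoopA]

theorem alt_eval (c a : String) (ci ai : Int) (t0 t1 t2 : String) (l : Int)
    (hmc : classesB.contains c = true) (hma : alignmentsB.contains a = true)
    (hci : (((PySem.List.index? classesB c).getD 0 : Nat) : Int) = ci)
    (hai : (((PySem.List.index? alignmentsB a).getD 0 : Nat) : Int) = ai)
    (h0 : PySem.List.pyGet? flatB ((ci * 3 + ai) * 3) = some t0)
    (h1 : PySem.List.pyGet? flatB ((ci * 3 + ai) * 3 + 1) = some t1)
    (h2 : PySem.List.pyGet? flatB ((ci * 3 + ai) * 3 + 2) = some t2) :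
    get_character_title_alt c a l =
      (if 1 ≤ l ∧ l ≤ 3 then t0 else if 4 ≤ l ∧ l ≤ 6 then t1
       else if 7 ≤ l ∧ l ≤ 10 then t2 else "Adventurer") := by
  simp only [get_character_title_alt, hmc, hma, hci, hai]
  by_cases hA : 1 ≤ l ∧ l ≤ 3
  · simp [hA, h0]
  by_cases hB : 4 ≤ l ∧ l ≤ 6
  · simp [hA, hB, h1]
  by_cases hC : 7 ≤ l ∧ l ≤ 10
  · simp [hA, hB, hC, h2]
  · simp [hA, hB, hC]

theorem gct_case_FL (l : Int) :
    get_character_title "Fighter" "Lawful" l = get_character_title_alt "Fighter" "Lawful" l := by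
  rw [show get_character_title "Fighter" "Lawful" l = titleLoopA [((1, 3), "Guardian"), ((4, 6), "Defender"), ((7, 10), "Champion")] l from rfl,
      alt_eval "Fighter" "Lawful" 0 0 "Guardian" "Defender" "Champion" l (by decide) (by decide)
        (by decide) (by decide) (by decide) (by decide) (by decide)]
  exact tiers_eq "Guardian" "Defender" "Champion" l

theorem gct_case_FC (l : Int) :
    get_character_title "Fighter" "Chaotic" l = get_character_title_alt "Fighter" "Chaotic" l := by
  rw [show get_character_title "Fighter" "Chaotic" l = titleLoopA [((1, 3), "Warrior"), ((4, 6), "Berserker"), ((7, 10), "Warlord")] l from rfl,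
      alt_eval "Fighter" "Chaotic" 0 1 "Warrior" "Berserker" "Warlord" l (by decide) (by decide)
        (by decide) (by decide) (by decide) (by decide) (by decide)]
  exact tiers_eq "Warrior" "Berserker" "Warlord" l

theorem gct_case_FN (l : Int) :
    get_character_title "Fighter" "Neutral" l = get_character_title_alt "Fighter" "Neutral" l := by
  rw [show get_character_title "Fighter" "Neutral" l = titleLoopA [((1, 3), "Soldier"), ((4, 6), "Veteran"), ((7, 10), "Commander")] l from rfl,
      alt_eval "Fighter" "Neutral" 0 2 "Soldier" "Veteran" "Commander" l (by decide) (by decide)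
        (by decide) (by decide) (by decide) (by decide) (by decide)]
  exact tiers_eq "Soldier" "Veteran" "Commander" l

theorem gct_case_PL (l : Int) :
    get_character_title "Priest" "Lawful" l = get_character_title_alt "Priest" "Lawful" l := by
  rw [show get_character_title "Priest" "Lawful" l = titleLoopA [((1, 3), "Acolyte"), ((4, 6), "Cleric"), ((7, 10), "High Priest")] l from rfl,
      alt_eval "Priest" "Lawful" 1 0 "Acolyte" "Cleric" "High Priest" l (by decide) (by decide)
        (by decide) (by decide) (by decide) (by decide) (by decide)]
  exact tiers_eq "Acolyte" "Cleric" "High Priest" l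

theorem gct_case_PC (l : Int) :
    get_character_title "Priest" "Chaotic" l = get_character_title_alt "Priest" "Chaotic" l := by
  rw [show get_character_title "Priest" "Chaotic" l = titleLoopA [((1, 3), "Zealot"), ((4, 6), "Fanatic"), ((7, 10), "Prophet")] l from rfl,
      alt_eval "Priest" "Chaotic" 1 1 "Zealot" "Fanatic" "Prophet" l (by decide) (by decide)
        (by decide) (by decide) (by decide) (by decide) (by decide)]
  exact tiers_eq "Zealot" "Fanatic" "Prophet" l

theorem gct_case_PN (l : Int) :
    get_character_title "Priest" "Neutral" l = get_character_title_alt "Priest" "Neutral" l := by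
  rw [show get_character_title "Priest" "Neutral" l = titleLoopA [((1, 3), "Initiate"), ((4, 6), "Priest"), ((7, 10), "Elder")] l from rfl,
      alt_eval "Priest" "Neutral" 1 2 "Initiate" "Priest" "Elder" l (by decide) (by decide)
        (by decide) (by decide) (by decide) (by decide) (by decide)]
  exact tiers_eq "Initiate" "Priest" "Elder" l

theorem gct_case_WL (l : Int) :
    get_character_title "Wizard" "Lawful" l = get_character_title_alt "Wizard" "Lawful" l := by
  rw [show get_character_title "Wizard" "Lawful" l = titleLoopA [((1, 3), "Apprentice"), ((4, 6), "Mage"), ((7, 10), "Arch-Mage")] l from rfl,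
      alt_eval "Wizard" "Lawful" 2 0 "Apprentice" "Mage" "Arch-Mage" l (by decide) (by decide)
        (by decide) (by decide) (by decide) (by decide) (by decide)]
  exact tiers_eq "Apprentice" "Mage" "Arch-Mage" l

theorem gct_case_WC (l : Int) :
    get_character_title "Wizard" "Chaotic" l = get_character_title_alt "Wizard" "Chaotic" l := by
  rw [show get_character_title "Wizard" "Chaotic" l = titleLoopA [((1, 3), "Hedge Wizard"), ((4, 6), "Sorcerer"), ((7, 10), "Archmage")] l from rfl,
      alt_eval "Wizard" "Chaotic" 2 1 "Hedge Wizard" "Sorcerer" "Archmage" l (by decide) (by decide)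
        (by decide) (by decide) (by decide) (by decide) (by decide)]
  exact tiers_eq "Hedge Wizard" "Sorcerer" "Archmage" l

theorem gct_case_WN (l : Int) :
    get_character_title "Wizard" "Neutral" l = get_character_title_alt "Wizard" "Neutral" l := by
  rw [show get_character_title "Wizard" "Neutral" l = titleLoopA [((1, 3), "Student"), ((4, 6), "Scholar"), ((7, 10), "Sage")] l from rfl,
      alt_eval "Wizard" "Neutral" 2 2 "Student" "Scholar" "Sage" l (by decide) (by decide)
        (by decide) (by decide) (by decide) (by decide) (by decide)]
  exact tiers_eq "Student" "Scholar" "Sage" l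

theorem gct_case_TL (l : Int) :
    get_character_title "Thief" "Lawful" l = get_character_title_alt "Thief" "Lawful" l := by
  rw [show get_character_title "Thief" "Lawful" l = titleLoopA [((1, 3), "Scout"), ((4, 6), "Agent"), ((7, 10), "Spymaster")] l from rfl,
      alt_eval "Thief" "Lawful" 3 0 "Scout" "Agent" "Spymaster" l (by decide) (by decide)
        (by decide) (by decide) (by decide) (by decide) (by decide)]
  exact tiers_eq "Scout" "Agent" "Spymaster" l

theorem gct_case_TC (l : Int) :
    get_character_title "Thief" "Chaotic" l = get_character_title_alt "Thief" "Chaotic" l := by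
  rw [show get_character_title "Thief" "Chaotic" l = titleLoopA [((1, 3), "Rogue"), ((4, 6), "Thief"), ((7, 10), "Master Thief")] l from rfl,
      alt_eval "Thief" "Chaotic" 3 1 "Rogue" "Thief" "Master Thief" l (by decide) (by decide)
        (by decide) (by decide) (by decide) (by decide) (by decide)]
  exact tiers_eq "Rogue" "Thief" "Master Thief" l

theorem gct_case_TN (l : Int) :
    get_character_title "Thief" "Neutral" l = get_character_title_alt "Thief" "Neutral" l := by
  rw [show get_character_title "Thief" "Neutral" l = titleLoopA [((1, 3), "Burglar"), ((4, 6), "Infiltrator"), ((7, 10), "Shadow")] l from rfl,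
      alt_eval "Thief" "Neutral" 3 2 "Burglar" "Infiltrator" "Shadow" l (by decide) (by decide)
        (by decide) (by decide) (by decide) (by decide) (by decide)]
  exact tiers_eq "Burglar" "Infiltrator" "Shadow" l

theorem gct_case (c a : String)
    (hc : c = "Fighter" ∨ c = "Priest" ∨ c = "Wizard" ∨ c = "Thief")
    (ha : a = "Lawful" ∨ a = "Chaotic" ∨ a = "Neutral") (l : Int) :
    get_character_title c a l = get_character_title_alt c a l := by
  rcases hc with h | h | h | h <;> subst h <;> rcases ha with h | h | h <;> subst h
  · exact gct_case_FL l
  · exact gct_case_FC l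
  · exact gct_case_FN l
  · exact gct_case_PL l
  · exact gct_case_PC l
  · exact gct_case_PN l
  · exact gct_case_WL l
  · exact gct_case_WC l
  · exact gct_case_WN l
  · exact gct_case_TL l
  · exact gct_case_TC l
  · exact gct_case_TN l

-- ===== VERDICT =====
theorem get_character_title_spec : Claim_equal_get_character_title := by
  intro c a l _
  unfold Spec_get_character_title
  by_cases hc : c = "Fighter" ∨ c = "Priest" ∨ c = "Wizard" ∨ c = "Thief"
  · by_cases ha : a = "Lawful" ∨ a = "Chaotic" ∨ a = "Neutral"
    · exact gct_case c a hc ha l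
    · push Not at ha
      obtain ⟨h1, h2, h3⟩ := ha
      exact (gct_no_align c hc a l (fun h => h1 h.symm) (fun h => h2 h.symm)
        (fun h => h3 h.symm)).trans (gct_alt_no_align c a l (fun h => h1 h.symm)
        (fun h => h2 h.symm) (fun h => h3 h.symm)).symm
  · push Not at hc
    obtain ⟨h1, h2, h3, h4⟩ := hc
    exact (gct_no_class c a l (fun h => h1 h.symm) (fun h => h2 h.symm)
      (fun h => h3 h.symm) (fun h => h4 h.symm)).trans (gct_alt_no_class c a l
      (fun h => h1 h.symm) (fun h => h2 h.symm) (fun h => h3 h.symm)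
      (fun h => h4 h.symm)).symm
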